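-- pv_equiv track=rewrite | github.com/krrakenn/rg3 | sheets_automation2.py | _build_column_range_values
-- ===== SOURCE A (Python) =====
-- def _build_column_range_values(existing_column_values, total_metrics):
--     column_values = []
--
--     for row in range(2, total_metrics + 2):
--         current_value = ""
--         if len(existing_column_values) >= row:
--             current_value = existing_column_values[row - 1]
--         column_values.append([current_value])
--
--     return column_values
-- ===== SOURCE B (Python) =====
-- def _build_column_range_values(existing_column_values, total_metrics):
--     n = max(total_metrics, 0)
--     head = existing_column_values[1:1 + n]
--     return [[v] for v in head] + [[""]] * (n - len(head))
-- ===== Notes on version B (the rewrite author's own statement) =====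
-- stated objective: simpler
-- what changed: Replaces the per-row loop with its length-check-and-index on every iteration by one clamped slice of the list plus wrapping each value and padding with [""] rows to the requested count.
import Mathlib
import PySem

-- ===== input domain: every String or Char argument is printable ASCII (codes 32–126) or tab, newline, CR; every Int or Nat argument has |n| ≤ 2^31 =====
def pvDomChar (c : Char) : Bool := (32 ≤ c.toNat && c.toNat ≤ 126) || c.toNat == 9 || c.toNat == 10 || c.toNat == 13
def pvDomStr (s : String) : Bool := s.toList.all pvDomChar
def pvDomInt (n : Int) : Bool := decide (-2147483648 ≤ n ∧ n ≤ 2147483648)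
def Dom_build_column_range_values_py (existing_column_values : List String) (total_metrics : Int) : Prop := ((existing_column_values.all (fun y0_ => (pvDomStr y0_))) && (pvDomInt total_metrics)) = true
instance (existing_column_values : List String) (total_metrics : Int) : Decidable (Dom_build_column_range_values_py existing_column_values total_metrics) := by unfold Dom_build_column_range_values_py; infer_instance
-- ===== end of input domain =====

-- B replaces A's per-row length-check-and-index loop by one clamped slice plus padding (objective: simpler).


-- ===== PORT A =====
def build_column_range_values_py (existing_column_values : List String) (total_metrics : Int) : List (List String) :=
  (PySem.List.pyRange 2 (total_metrics + 2) 1).foldl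
    (fun column_values row =>
      let current_value : String :=
        if (existing_column_values.length : Int) ≥ row then
          -- guard guarantees 1 ≤ row - 1 < length, so the default of pyGetD is never used
          PySem.List.pyGetD existing_column_values (row - 1) ""
        else ""
      column_values ++ [[current_value]]) []

-- ===== PORT B =====
def build_column_range_values_py_alt (existing_column_values : List String) (total_metrics : Int) : List (List String) :=
  let n := max total_metrics 0
  let head := PySem.List.slice existing_column_values (some 1) (some (1 + n))
  head.map (fun v => [v]) ++ List.replicate (n.toNat - head.length) [""]

-- ===== PRECONDITION & SPEC =====
def Spec_build_column_range_values_py (existing_column_values : List String) (total_metrics : Int) (out : List (List String)) : Prop := out = build_column_range_values_py_alt existing_column_values total_metrics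
instance (existing_column_values : List String) (total_metrics : Int) (out : List (List String)) : Decidable (Spec_build_column_range_values_py existing_column_values total_metrics out) := by unfold Spec_build_column_range_values_py; infer_instance

-- ===== CLAIM (what is proved, stated in full; the proofs are below) =====
def Claim_equal_build_column_range_values_py : Prop := ∀ (existing_column_values : List String) (total_metrics : Int), Dom_build_column_range_values_py existing_column_values total_metrics → Spec_build_column_range_values_py existing_column_values total_metrics (build_column_range_values_py existing_column_values total_metrics)

-- ===== LEMMAS AND PROOFS =====

-- core shape: reading indices 0..N-1 of t with default "" equals take-then-pad
theorem pv_core (t : List String) (N : Nat) :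
    (List.range N).map (fun k => if k < t.length then [t.getD k ""] else [""])
      = (t.take N).map (fun v => [v]) ++ List.replicate (N - min N t.length) [""] := by
  induction t generalizing N with
  | nil =>
      simp only [List.length_nil, Nat.not_lt_zero, if_false, List.take_nil, List.map_nil,
        List.nil_append, Nat.min_zero, Nat.sub_zero]
      induction N with
      | zero => simp
      | succ M ih => simp [List.range_succ, ih, List.replicate_succ']
  | cons a t ih =>
      cases N with
      | zero => simp
      | succ M =>
          rw [List.range_succ_eq_map]
          simp only [List.map_cons, List.map_map]
          have h1 : ((List.range M).map ((fun k => if k < (a :: t).length then [(a :: t).getD k ""] else [""]) ∘ Nat.succ))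
              = (List.range M).map (fun k => if k < t.length then [t.getD k ""] else [""]) := by
            apply List.map_congr_left
            intro k _
            simp
          rw [h1, ih]
          simp only [List.length_cons, Nat.zero_lt_succ, if_true, List.getD_cons_zero,
            List.take_succ_cons, List.map_cons, List.cons_append]
          have : M + 1 - min (M + 1) (t.length + 1) = M - min M t.length := by omega
          rw [this]

theorem pv_equal (existing_column_values : List String) (total_metrics : Int) :
    build_column_range_values_py existing_column_values total_metrics
      = build_column_range_values_py_alt existing_column_values total_metrics := by
  unfold build_column_range_values_py build_column_range_values_py_alt
  rw [PySem.List.foldl_append_singleton_eq_map, List.nil_append]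
  rw [PySem.List.pyRange_one]
  rw [List.map_map]
  have hN : (total_metrics + 2 - 2).toNat = total_metrics.toNat := by omega
  rw [hN]
  have hfun : ∀ k : Nat,
      ((fun row : Int => [if (existing_column_values.length : Int) ≥ row then
          PySem.List.pyGetD existing_column_values (row - 1) "" else ""]) ∘
        (fun k : Nat => (2 : Int) + k)) k
      = (fun k : Nat => if k < existing_column_values.tail.length
          then [existing_column_values.tail.getD k ""] else [""]) k := by
    intro k
    simp only [Function.comp]
    have hc : ((existing_column_values.length : Int) ≥ 2 + (k : Int))
        ↔ (k < existing_column_values.tail.length) := by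
      rcases existing_column_values with _ | ⟨a, t⟩ <;> simp <;> omega
    have hidx : (2 : Int) + (k : Int) - 1 = ((k + 1 : Nat) : Int) := by push_cast; ring
    by_cases h : k < existing_column_values.tail.length
    · rw [if_pos (hc.mpr h), if_pos h, hidx, PySem.List.pyGetD_natCast]
      rcases existing_column_values with _ | ⟨a, t⟩
      · simp at h
      · simp [List.getD]
    · rw [if_neg (fun hh => h (hc.mp hh)), if_neg h]
  rw [funext hfun]  -- rewrite the mapped function
  rw [pv_core]
  -- now match B's slice/replicate form
  have hm : max total_metrics 0 = ((total_metrics.toNat : Nat) : Int) := by omega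
  rw [hm]
  have hslice : PySem.List.slice existing_column_values (some 1) (some (1 + (total_metrics.toNat : Int)))
      = existing_column_values.tail.take total_metrics.toNat := by
    rw [show ((1 : Int) + (total_metrics.toNat : Int)) = (((1 + total_metrics.toNat : Nat)) : Int) by push_cast; ring]
    rw [show ((1 : Int)) = (((1 : Nat)) : Int) by norm_num]
    rw [PySem.List.slice_natCast]
    simp [List.drop_one]
  simp only [hslice, List.length_take, Int.toNat_natCast]

-- ===== VERDICT (by name: the statement is the Claim_ definition above) =====
theorem build_column_range_values_py_spec : Claim_equal_build_column_range_values_py := by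
  intro xs n _
  exact pv_equal xs n
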